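-- pv_equiv track=rewrite | github.com/AdamZhouSE/pythonHomework | Code/CodeRecords/2957/60670/304312.py | strange
-- ===== SOURCE A (Python) =====
-- def strange(ss):
--     nn=len(ss)
--     cnt=1
--     for i in range(1,nn):
--         if ss[i]!=ss[i-1]:
--             cnt+=1
--         if cnt>2:
--             return False
--     return True
-- ===== SOURCE B (Python) =====
-- def strange(ss):
--     # Strip the leading run, then strip the leading run of what remains;
--     # the string has at most two runs iff nothing is left.
--     rest = ss.lstrip(ss[:1])
--     return not rest.lstrip(rest[:1])
-- ===== Notes on version B (the rewrite author's own statement) =====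
-- stated objective: idiomatic
-- what changed: Replaces the transition counter with early exit by two staged lstrip passes: strip the leading run, strip the leading run of the remainder, and test that nothing is left.
import Mathlib
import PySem

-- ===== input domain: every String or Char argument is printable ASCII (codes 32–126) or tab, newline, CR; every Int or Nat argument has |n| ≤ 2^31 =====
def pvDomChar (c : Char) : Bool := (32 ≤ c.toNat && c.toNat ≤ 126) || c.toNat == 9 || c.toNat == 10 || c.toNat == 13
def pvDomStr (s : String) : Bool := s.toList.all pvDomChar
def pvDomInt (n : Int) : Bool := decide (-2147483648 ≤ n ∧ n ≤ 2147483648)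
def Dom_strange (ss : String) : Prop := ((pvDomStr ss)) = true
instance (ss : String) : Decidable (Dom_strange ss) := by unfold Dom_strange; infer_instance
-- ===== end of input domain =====

-- B drops A's transition counter: it strips the leading run twice with lstrip and tests that nothing remains; same cost, more idiomatic.

-- ===== PORT A =====
-- the for-loop over range(1,nn) with early `return False`, as index recursion carrying cnt
def strangeGo (cs : List Char) (i : Nat) (cnt : Int) : Bool :=
  if h : i < cs.length then
    let cnt' := if cs[i]! ≠ cs[i-1]! then cnt + 1 else cnt
    if cnt' > 2 then false else strangeGo cs (i + 1) cnt'
  else true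
termination_by cs.length - i

def strange (ss : String) : Bool := strangeGo ss.toList 1 1

-- ===== PORT B =====
-- s.lstrip(chars): drop leading characters that occur in `chars` (exact for this use)
def lstripChars (cs : List Char) (chars : List Char) : List Char :=
  cs.dropWhile (chars.contains ·)

def strange_alt (ss : String) : Bool :=
  let rest := lstripChars ss.toList (ss.toList.take 1)
  let rest2 := lstripChars rest (rest.take 1)
  rest2.isEmpty

-- ===== PRECONDITION & SPEC =====
def Spec_strange (ss : String) (out : Bool) : Prop := out = strange_alt ss
instance (ss : String) (out : Bool) : Decidable (Spec_strange ss out) := by unfold Spec_strange; infer_instance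

-- ===== CLAIM (what is proved, stated in full; the proofs are below) =====
def Claim_equal_strange : Prop := ∀ (ss : String), Dom_strange ss → Spec_strange ss (strange ss)

-- ===== LEMMAS AND PROOFS =====

-- number of transitions at positions j ≥ i (proof-side helper for A)
def tfrom (cs : List Char) (i : Nat) : Int :=
  if _h : i < cs.length then
    (if cs[i]! ≠ cs[i-1]! then (1 : Int) else 0) + tfrom cs (i + 1)
  else 0
termination_by cs.length - i

-- structural transition count (common ground of the two proofs)
def transCnt : List Char → Int
  | a :: b :: t => (if b ≠ a then (1 : Int) else 0) + transCnt (b :: t)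
  | _ => 0

theorem tfrom_nonneg (cs : List Char) (i : Nat) : 0 ≤ tfrom cs i := by
  fun_induction tfrom cs i with
  | case1 i _ ih => split <;> omega
  | case2 i _ => rfl

theorem strangeGo_eq (cs : List Char) (i : Nat) (cnt : Int) :
    cnt ≤ 2 → strangeGo cs i cnt = decide (cnt + tfrom cs i ≤ 2) := by
  fun_induction strangeGo cs i cnt with
  | case1 i cnt h cnt' h2 =>
      intro _
      have hn := tfrom_nonneg cs (i + 1)
      rw [tfrom, dif_pos h]
      simp only [cnt'] at h2
      by_cases hc : cs[i]! ≠ cs[i - 1]!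
      · rw [dif_pos hc] at h2; rw [if_pos hc]; simp; omega
      · rw [dif_neg hc] at h2; rw [if_neg hc]; simp; omega
  | case2 i cnt h cnt' h2 ih =>
      intro _
      simp only [cnt'] at h2 ih ⊢
      by_cases hc : cs[i]! ≠ cs[i - 1]!
      · rw [dif_pos hc] at h2
        simp only [dif_pos hc] at ih ⊢
        rw [ih (by omega)]
        conv_rhs => rw [tfrom, dif_pos h, if_pos hc]
        simp only [decide_eq_decide]
        omega
      · rw [dif_neg hc] at h2
        simp only [dif_neg hc] at ih ⊢
        rw [ih (by omega)]
        conv_rhs => rw [tfrom, dif_pos h, if_neg hc]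
        simp only [decide_eq_decide]
        omega
  | case3 i cnt h =>
      intro hle
      rw [tfrom, dif_neg h]
      simp
      omega

theorem tfrom_shift_aux (c : Char) (cs : List Char) :
    ∀ (n i : Nat), cs.length - i ≤ n → 1 ≤ i → tfrom (c :: cs) (i + 1) = tfrom cs i := by
  intro n
  induction n with
  | zero =>
      intro i hle _
      rw [tfrom, dif_neg (by simp; omega)]
      rw [tfrom, dif_neg (by omega)]
  | succ n ih =>
      intro i hle hi
      by_cases h : i < cs.length
      · rw [tfrom, dif_pos (by simp; omega)]
        conv_rhs => rw [tfrom, dif_pos h]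
        rw [ih (i + 1) (by omega) (by omega)]
        congr 2
        have h1 : i + 1 - 1 = (i - 1) + 1 := by omega
        rw [h1]
        simp
      · rw [tfrom, dif_neg (by simp; omega)]
        rw [tfrom, dif_neg h]

theorem tfrom_shift (c : Char) (cs : List Char) (i : Nat) (hi : 1 ≤ i) :
    tfrom (c :: cs) (i + 1) = tfrom cs i :=
  tfrom_shift_aux c cs cs.length i (by omega) hi

theorem tfrom_eq_transCnt (cs : List Char) : tfrom cs 1 = transCnt cs := by
  induction cs with
  | nil => rw [tfrom, dif_neg (by simp)]; rfl
  | cons a t ih =>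
      cases t with
      | nil => rw [tfrom, dif_neg (by simp)]; rfl
      | cons b t' =>
          rw [tfrom, dif_pos (by simp)]
          rw [tfrom_shift a (b :: t') 1 le_rfl, ih]
          rfl

theorem transCnt_nonneg (cs : List Char) : 0 ≤ transCnt cs := by
  fun_induction transCnt cs with
  | case1 a b t ih => split <;> omega
  | case2 => simp

theorem transCnt_zero_iff (b : Char) (t : List Char) :
    transCnt (b :: t) = 0 ↔ ∀ x ∈ t, x = b := by
  induction t generalizing b with
  | nil => simp [transCnt]
  | cons c t' ih =>
      have hn := transCnt_nonneg (c :: t')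
      constructor
      · intro h
        simp only [transCnt] at h
        have hcb : ¬ c ≠ b := by by_contra hc; rw [if_pos hc] at h; omega
        rw [if_neg hcb] at h
        push Not at hcb
        subst hcb
        intro x hx
        rcases List.mem_cons.mp hx with h1 | h1
        · exact h1
        · exact (ih c).mp (by omega) x h1
      · intro h
        have hcb : c = b := h c (by simp)
        subst hcb
        simp only [transCnt, if_neg (by simp : ¬ c ≠ c), zero_add]
        exact (ih c).mpr (fun x hx => h x (List.mem_cons_of_mem _ hx))

theorem alt_eq_transCnt (cs : List Char) :
    (let rest := lstripChars cs (cs.take 1)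
     let rest2 := lstripChars rest (rest.take 1)
     rest2.isEmpty) = decide (transCnt cs ≤ 1) := by
  cases cs with
  | nil => rfl
  | cons c t =>
      simp only [List.take, lstripChars, List.dropWhile_cons,
        List.contains_cons, List.contains_nil, beq_self_eq_true, Bool.true_or, if_pos]
      induction t generalizing c with
      | nil => rfl
      | cons b t' ih =>
          by_cases hbc : b = c
          · subst hbc
            simpa [List.dropWhile_cons, transCnt] using ih b
          · have hn := transCnt_nonneg (b :: t')
            rw [List.dropWhile_cons, if_neg (by simp [hbc])]
            simp only [List.take, List.dropWhile_cons,
              List.contains_cons, List.contains_nil, beq_self_eq_true, Bool.true_or, if_pos]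
            have htc : transCnt (c :: b :: t') = 1 + transCnt (b :: t') := by
              simp [transCnt, hbc]
            rw [Bool.eq_iff_iff]
            simp only [htc, decide_eq_true_eq, List.isEmpty_iff, List.dropWhile_eq_nil_iff]
            rw [show ((1 : Int) + transCnt (b :: t') ≤ 1) ↔ transCnt (b :: t') = 0 from by omega,
              transCnt_zero_iff]
            simp

-- ===== VERDICT (by name: the statement is the Claim_ definition above) =====
theorem strange_spec : Claim_equal_strange := by
  intro ss _
  unfold Spec_strange strange strange_alt
  rw [strangeGo_eq _ _ _ (by omega), tfrom_eq_transCnt, alt_eq_transCnt]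
  simp only [decide_eq_decide]
  omega
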